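-- pv_equiv track=rewrite | github.com/hevarmette/Swiss_Tournament_Management | swiss_rounds.py | get_rounds
-- ===== SOURCE A (Python) =====
-- def get_rounds(num_players):
--     if num_players < 4:
--         raise ValueError("Tournament requires at least 4 players")
--
--     brackets = [
--         (8, 3, 3, None, None),
--         (16, 4, 4, None, 2),
--         (32, 6, 6, None, 4),
--         (64, 7, 7, None, 6),
--         (128, 9, 7, 13, 8),
--         (256, 10, 8, 16, 8),
--         (512, 11, 8, 16, 8),
--         (1024, 12, 8, 16, 8),
--         (2048, 13, 8, 16, 8),
--         (4096, 14, 8, 16, 8),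
--         (8192, 15, 9, 19, 8),
--     ]
--
--     for max_players, rounds, phase1, point_thresh, top_cut in brackets:
--         if num_players < max_players + 1:
--             return rounds, phase1, point_thresh, top_cut
--
--     return ValueError("Too many players!!")
-- ===== SOURCE B (Python) =====
-- def get_rounds(num_players):
--     if num_players < 4:
--         raise ValueError("Tournament requires at least 4 players")
--     # bracket exponent: smallest k with num_players <= 2**k, clamped to the 2**3 minimum bracket
--     k = max(3, (num_players - 1).bit_length())
--     if k > 13:
--         raise ValueError("Too many players!!")
--     rounds = k + (0 if k < 5 else 1 if k < 7 else 2)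
--     phase1 = rounds if k <= 6 else 7 if k == 7 else 9 if k == 13 else 8
--     point_thresh = None if k < 7 else 3 * phase1 - 8
--     top_cut = None if k == 3 else min(8, 2 * (k - 3))
--     return rounds, phase1, point_thresh, top_cut
-- ===== Notes on version B (the rewrite author's own statement) =====
-- stated objective: alternative
-- what changed: Dropped the bracket table entirely: B computes the bracket exponent k from (num_players-1).bit_length() and derives all four fields (rounds, phase1, point_thresh = 3*phase1-8, top_cut = min(8, 2*(k-3))) by closed-form arithmetic instead of scanning an 11-row table.
import Mathlib
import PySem

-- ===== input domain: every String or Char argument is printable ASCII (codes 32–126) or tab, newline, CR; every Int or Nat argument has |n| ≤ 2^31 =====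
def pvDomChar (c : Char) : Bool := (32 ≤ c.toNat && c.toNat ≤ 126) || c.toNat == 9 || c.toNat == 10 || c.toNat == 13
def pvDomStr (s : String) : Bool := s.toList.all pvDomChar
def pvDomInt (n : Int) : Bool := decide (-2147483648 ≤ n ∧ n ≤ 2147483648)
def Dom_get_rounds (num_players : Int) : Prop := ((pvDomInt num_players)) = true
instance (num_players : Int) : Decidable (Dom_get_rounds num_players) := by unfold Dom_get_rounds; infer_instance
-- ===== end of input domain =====

-- B drops A's 11-row bracket table and linear scan: it computes the bracket exponent from
-- bit_length and derives all four fields by closed-form arithmetic (alternative).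

-- ===== PORT A =====
-- A's bracket table (max_players, rounds, phase1, point_thresh, top_cut)
def pvBrackets : List (Int × Int × Int × Option Int × Option Int) :=
  [ (8, 3, 3, none, none),
    (16, 4, 4, none, some 2),
    (32, 6, 6, none, some 4),
    (64, 7, 7, none, some 6),
    (128, 9, 7, some 13, some 8),
    (256, 10, 8, some 16, some 8),
    (512, 11, 8, some 16, some 8),
    (1024, 12, 8, some 16, some 8),
    (2048, 13, 8, some 16, some 8),
    (4096, 14, 8, some 16, some 8),
    (8192, 15, 9, some 19, some 8) ]

-- the for-loop over the table: return at the first row with num_players < max_players + 1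
def pvScan (rows : List (Int × Int × Int × Option Int × Option Int)) (n : Int) :
    Int × Int × Option Int × Option Int :=
  match rows with
  | [] => (0, 0, none, none)   -- Python falls off the loop and returns a ValueError OBJECT here (outside Pre_)
  | row :: rest =>
      if n < row.1 + 1 then (row.2.1, row.2.2.1, row.2.2.2.1, row.2.2.2.2) else pvScan rest n

def get_rounds (num_players : Int) : Int × Int × Option Int × Option Int :=
  if num_players < 4 then (0, 0, none, none)   -- Python raises ValueError here (outside Pre_)
  else pvScan pvBrackets num_players

-- ===== PORT B =====
-- (num_players - 1).bit_length() for num_players ≥ 4 is Nat.size of the Nat value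
def get_rounds_alt (num_players : Int) : Int × Int × Option Int × Option Int :=
  if num_players < 4 then (0, 0, none, none)   -- Python raises ValueError here (outside Pre_)
  else
    let k : Nat := max 3 (Nat.size (num_players - 1).toNat)
    if k > 13 then (0, 0, none, none)   -- Python raises ValueError here (outside Pre_)
    else
      let rounds : Int := (k : Int) + (if k < 5 then 0 else if k < 7 then 1 else 2)
      let phase1 : Int := if k ≤ 6 then rounds else if k = 7 then 7 else if k = 13 then 9 else 8
      let point_thresh : Option Int := if k < 7 then none else some (3 * phase1 - 8)
      let top_cut : Option Int := if k = 3 then none else some (min 8 (2 * ((k : Int) - 3)))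
      (rounds, phase1, point_thresh, top_cut)

-- ===== PRECONDITION & SPEC =====
-- Pre_ excludes counts below the four-player minimum, where A raises ValueError, and counts above
-- the largest bracket, where A RETURNS a ValueError object instead of a tuple of the declared type (B raises there).
def Pre_get_rounds (num_players : Int) : Prop := 4 ≤ num_players ∧ num_players ≤ 8192
instance (num_players : Int) : Decidable (Pre_get_rounds num_players) := by unfold Pre_get_rounds; infer_instance
def pvWitness_get_rounds : Int := 37

def Spec_get_rounds (num_players : Int) (out : Int × Int × Option Int × Option Int) : Prop := out = get_rounds_alt num_players
instance (num_players : Int) (out : Int × Int × Option Int × Option Int) : Decidable (Spec_get_rounds num_players out) := by unfold Spec_get_rounds; infer_instance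

-- ===== CLAIM (what is proved, stated in full; the proofs are below) =====
def Claim_equal_get_rounds : Prop := ∀ (num_players : Int), Dom_get_rounds num_players → Pre_get_rounds num_players → Spec_get_rounds num_players (get_rounds num_players)

-- ===== LEMMAS AND PROOFS =====

theorem pv_size_eq (k : ℕ) (m : ℕ) (h1 : 2 ^ k ≤ m) (h2 : m < 2 ^ (k + 1)) : Nat.size m = k + 1 := by
  have a := Nat.size_le.mpr h2
  have b := Nat.lt_size.mpr h1
  omega

theorem pv_size_le3 (m : ℕ) (h : m < 8) : Nat.size m ≤ 3 :=
  Nat.size_le.mpr (by omega)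

-- closed form of the scan over A's literal table (definitional)
theorem pv_scan_eq (n : Int) : pvScan pvBrackets n =
    (if n < 9 then ((3:Int), (3:Int), (none:Option Int), (none:Option Int))
     else if n < 17 then (4, 4, none, some 2)
     else if n < 33 then (6, 6, none, some 4)
     else if n < 65 then (7, 7, none, some 6)
     else if n < 129 then (9, 7, some 13, some 8)
     else if n < 257 then (10, 8, some 16, some 8)
     else if n < 513 then (11, 8, some 16, some 8)
     else if n < 1025 then (12, 8, some 16, some 8)
     else if n < 2049 then (13, 8, some 16, some 8)
     else if n < 4097 then (14, 8, some 16, some 8)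
     else if n < 8193 then (15, 9, some 19, some 8)
     else (0, 0, none, none)) := rfl

-- ===== VERDICT (by name: the statement is the Claim_ definition above) =====
theorem get_rounds_spec : Claim_equal_get_rounds := by
  intro n _ hpre
  obtain ⟨h4, hle⟩ := hpre
  have hn4 : ¬ n < 4 := by omega
  unfold Spec_get_rounds get_rounds get_rounds_alt
  rw [if_neg hn4, if_neg hn4]
  rcases (by omega : 4 ≤ n ∧ n ≤ 8 ∨ 8 < n ∧ n ≤ 16 ∨ 16 < n ∧ n ≤ 32 ∨ 32 < n ∧ n ≤ 64 ∨ 64 < n ∧ n ≤ 128 ∨ 128 < n ∧ n ≤ 256 ∨ 256 < n ∧ n ≤ 512 ∨ 512 < n ∧ n ≤ 1024 ∨ 1024 < n ∧ n ≤ 2048 ∨ 2048 < n ∧ n ≤ 4096 ∨ 4096 < n ∧ n ≤ 8192) with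
    ⟨a,b⟩|⟨a,b⟩|⟨a,b⟩|⟨a,b⟩|⟨a,b⟩|⟨a,b⟩|⟨a,b⟩|⟨a,b⟩|⟨a,b⟩|⟨a,b⟩|⟨a,b⟩
  · have hk : max 3 (Nat.size (n - 1).toNat) = 3 := by
      have := pv_size_le3 (n - 1).toNat (by omega); omega
    rw [hk, pv_scan_eq, if_pos (show n < 9 by omega)]
    rfl
  · have hk : max 3 (Nat.size (n - 1).toNat) = 4 := by
      have := pv_size_eq 3 (n - 1).toNat
        (by simp only [show (2:ℕ)^3 = 8 from rfl]; omega)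
        (by simp only [show (2:ℕ)^4 = 16 from rfl]; omega)
      omega
    rw [hk, pv_scan_eq, if_neg (show ¬ n < 9 by omega), if_pos (show n < 17 by omega)]
    rfl
  · have hk : max 3 (Nat.size (n - 1).toNat) = 5 := by
      have := pv_size_eq 4 (n - 1).toNat
        (by simp only [show (2:ℕ)^4 = 16 from rfl]; omega)
        (by simp only [show (2:ℕ)^5 = 32 from rfl]; omega)
      omega
    rw [hk, pv_scan_eq, if_neg (show ¬ n < 9 by omega), if_neg (show ¬ n < 17 by omega), if_pos (show n < 33 by omega)]
    rfl
  · have hk : max 3 (Nat.size (n - 1).toNat) = 6 := by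
      have := pv_size_eq 5 (n - 1).toNat
        (by simp only [show (2:ℕ)^5 = 32 from rfl]; omega)
        (by simp only [show (2:ℕ)^6 = 64 from rfl]; omega)
      omega
    rw [hk, pv_scan_eq, if_neg (show ¬ n < 9 by omega), if_neg (show ¬ n < 17 by omega), if_neg (show ¬ n < 33 by omega), if_pos (show n < 65 by omega)]
    rfl
  · have hk : max 3 (Nat.size (n - 1).toNat) = 7 := by
      have := pv_size_eq 6 (n - 1).toNat
        (by simp only [show (2:ℕ)^6 = 64 from rfl]; omega)
        (by simp only [show (2:ℕ)^7 = 128 from rfl]; omega)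
      omega
    rw [hk, pv_scan_eq, if_neg (show ¬ n < 9 by omega), if_neg (show ¬ n < 17 by omega), if_neg (show ¬ n < 33 by omega), if_neg (show ¬ n < 65 by omega), if_pos (show n < 129 by omega)]
    rfl
  · have hk : max 3 (Nat.size (n - 1).toNat) = 8 := by
      have := pv_size_eq 7 (n - 1).toNat
        (by simp only [show (2:ℕ)^7 = 128 from rfl]; omega)
        (by simp only [show (2:ℕ)^8 = 256 from rfl]; omega)
      omega
    rw [hk, pv_scan_eq, if_neg (show ¬ n < 9 by omega), if_neg (show ¬ n < 17 by omega), if_neg (show ¬ n < 33 by omega), if_neg (show ¬ n < 65 by omega), if_neg (show ¬ n < 129 by omega), if_pos (show n < 257 by omega)]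
    rfl
  · have hk : max 3 (Nat.size (n - 1).toNat) = 9 := by
      have := pv_size_eq 8 (n - 1).toNat
        (by simp only [show (2:ℕ)^8 = 256 from rfl]; omega)
        (by simp only [show (2:ℕ)^9 = 512 from rfl]; omega)
      omega
    rw [hk, pv_scan_eq, if_neg (show ¬ n < 9 by omega), if_neg (show ¬ n < 17 by omega), if_neg (show ¬ n < 33 by omega), if_neg (show ¬ n < 65 by omega), if_neg (show ¬ n < 129 by omega), if_neg (show ¬ n < 257 by omega), if_pos (show n < 513 by omega)]
    rfl
  · have hk : max 3 (Nat.size (n - 1).toNat) = 10 := by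
      have := pv_size_eq 9 (n - 1).toNat
        (by simp only [show (2:ℕ)^9 = 512 from rfl]; omega)
        (by simp only [show (2:ℕ)^10 = 1024 from rfl]; omega)
      omega
    rw [hk, pv_scan_eq, if_neg (show ¬ n < 9 by omega), if_neg (show ¬ n < 17 by omega), if_neg (show ¬ n < 33 by omega), if_neg (show ¬ n < 65 by omega), if_neg (show ¬ n < 129 by omega), if_neg (show ¬ n < 257 by omega), if_neg (show ¬ n < 513 by omega), if_pos (show n < 1025 by omega)]
    rfl
  · have hk : max 3 (Nat.size (n - 1).toNat) = 11 := by
      have := pv_size_eq 10 (n - 1).toNat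
        (by simp only [show (2:ℕ)^10 = 1024 from rfl]; omega)
        (by simp only [show (2:ℕ)^11 = 2048 from rfl]; omega)
      omega
    rw [hk, pv_scan_eq, if_neg (show ¬ n < 9 by omega), if_neg (show ¬ n < 17 by omega), if_neg (show ¬ n < 33 by omega), if_neg (show ¬ n < 65 by omega), if_neg (show ¬ n < 129 by omega), if_neg (show ¬ n < 257 by omega), if_neg (show ¬ n < 513 by omega), if_neg (show ¬ n < 1025 by omega), if_pos (show n < 2049 by omega)]
    rfl
  · have hk : max 3 (Nat.size (n - 1).toNat) = 12 := by
      have := pv_size_eq 11 (n - 1).toNat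
        (by simp only [show (2:ℕ)^11 = 2048 from rfl]; omega)
        (by simp only [show (2:ℕ)^12 = 4096 from rfl]; omega)
      omega
    rw [hk, pv_scan_eq, if_neg (show ¬ n < 9 by omega), if_neg (show ¬ n < 17 by omega), if_neg (show ¬ n < 33 by omega), if_neg (show ¬ n < 65 by omega), if_neg (show ¬ n < 129 by omega), if_neg (show ¬ n < 257 by omega), if_neg (show ¬ n < 513 by omega), if_neg (show ¬ n < 1025 by omega), if_neg (show ¬ n < 2049 by omega), if_pos (show n < 4097 by omega)]
    rfl
  · have hk : max 3 (Nat.size (n - 1).toNat) = 13 := by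
      have := pv_size_eq 12 (n - 1).toNat
        (by simp only [show (2:ℕ)^12 = 4096 from rfl]; omega)
        (by simp only [show (2:ℕ)^13 = 8192 from rfl]; omega)
      omega
    rw [hk, pv_scan_eq, if_neg (show ¬ n < 9 by omega), if_neg (show ¬ n < 17 by omega), if_neg (show ¬ n < 33 by omega), if_neg (show ¬ n < 65 by omega), if_neg (show ¬ n < 129 by omega), if_neg (show ¬ n < 257 by omega), if_neg (show ¬ n < 513 by omega), if_neg (show ¬ n < 1025 by omega), if_neg (show ¬ n < 2049 by omega), if_neg (show ¬ n < 4097 by omega), if_pos (show n < 8193 by omega)]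
    rfl
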